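-- pv_equiv track=rewrite | github.com/maxchanhi/music-theory-app | note_story/test_3.py | to_notename
-- ===== SOURCE A (Python) =====
-- note_name = 'abcdefg'
--
-- def to_notename(word=str):
--     start_idx = -1
--     end_idx = -1
--     in_note_sequence = False
--
--     for i, letter in enumerate(word):
--         if letter.lower() in note_name:  # Convert to lowercase for checking
--             if not in_note_sequence:
--                 start_idx = i
--                 in_note_sequence = True
--         else:
--             if in_note_sequence:
--                 end_idx = i
--                 break
--
--     if in_note_sequence and end_idx == -1:
--         end_idx = len(word)
--
--     if start_idx == -1 or end_idx == -1:
--         return word, '', ''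
--
--     non_notename = word[:start_idx]
--     notepart = word[start_idx:end_idx]
--     fin_nonnote = word[end_idx:]
--
--     return non_notename, notepart, fin_nonnote
-- ===== SOURCE B (Python) =====
-- def to_notename(word=str):
--     def is_note(ch):
--         return ch.lower() in 'abcdefg'
--     # stage 1: run-length decomposition of word into maximal runs of equal note-ness
--     runs = []
--     cur = []
--     for ch in word:
--         if cur and is_note(cur[0]) != is_note(ch):
--             runs.append(cur)
--             cur = []
--         cur.append(ch)
--     if cur:
--         runs.append(cur)
--     # stage 2: the first note run splits the word
--     for i, run in enumerate(runs):
--         if is_note(run[0]):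
--             before = ''.join(''.join(r) for r in runs[:i])
--             after = ''.join(''.join(r) for r in runs[i + 1:])
--             return before, ''.join(run), after
--     return word, '', ''
-- ===== Notes on version B (the rewrite author's own statement) =====
-- stated objective: alternative
-- what changed: Replaces A's early-breaking index state machine (start/end sentinels, in_note_sequence flag, post-loop fixup, string slicing) by a staged run-length decomposition: stage 1 groups the whole word into a list of maximal runs of equal note-ness, stage 2 picks the first note run and joins the runs before and after it.
import Mathlib
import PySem

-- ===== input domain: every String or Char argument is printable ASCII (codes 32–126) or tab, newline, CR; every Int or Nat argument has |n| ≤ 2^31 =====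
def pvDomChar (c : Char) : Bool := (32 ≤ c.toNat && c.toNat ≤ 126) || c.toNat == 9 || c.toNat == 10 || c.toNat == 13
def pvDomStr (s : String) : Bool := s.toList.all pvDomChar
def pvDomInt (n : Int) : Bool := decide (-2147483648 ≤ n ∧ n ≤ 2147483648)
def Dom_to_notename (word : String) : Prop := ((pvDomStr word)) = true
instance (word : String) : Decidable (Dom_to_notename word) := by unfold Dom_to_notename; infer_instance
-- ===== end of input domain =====

-- B replaces A's early-breaking index state machine (sentinels, flag, post-loop fixup, slicing)
-- by a staged run-length decomposition: group the word into maximal runs of equal note-ness,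
-- then pick the first note run and join the runs before and after it.

-- ===== PORT A =====
-- letter.lower() in note_name
def pvNoteA (letter : Char) : Bool :=
  PySem.Chars.isIn [PySem.Chars.lowerChar letter] "abcdefg".toList

-- the for-loop over enumerate(word): state (start_idx, end_idx, in_note_sequence); break = return
def pvLoopA : List Char → Nat → Int → Int → Bool → Int × Int × Bool
  | [], _, s, e, b => (s, e, b)
  | letter :: rest, i, s, e, b =>
    if pvNoteA letter then
      if !b then pvLoopA rest (i + 1) (i : Int) e true
      else pvLoopA rest (i + 1) s e b
    else
      if b then (s, (i : Int), b)   -- end_idx = i; break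
      else pvLoopA rest (i + 1) s e b

-- if start_idx == -1 or end_idx == -1: return word, '', ''; else the three slices
def pvRetA (word : String) (start_idx end_idx : Int) : String × String × String :=
  if start_idx == -1 || end_idx == -1 then (word, "", "")
  else
    (PySem.Str.slice word none (some start_idx),
     PySem.Str.slice word (some start_idx) (some end_idx),
     PySem.Str.slice word (some end_idx) none)

-- the post-loop fixup: if in_note_sequence and end_idx == -1: end_idx = len(word)
def pvFinishA (word : String) : Int × Int × Bool → String × String × String
  | (start_idx, end_idx, in_note_sequence) =>
    if in_note_sequence && end_idx == -1 then pvRetA word start_idx (word.toList.length : Int)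
    else pvRetA word start_idx end_idx

def to_notename (word : String) : String × String × String :=
  pvFinishA word (pvLoopA word.toList 0 (-1) (-1) false)

-- ===== PORT B =====
-- stage-1 loop body: if cur and is_note(cur[0]) != is_note(ch): runs.append(cur); cur = []
--                    cur.append(ch)
def pvStep (st : List (List Char) × List Char) (c : Char) : List (List Char) × List Char :=
  if !st.2.isEmpty && (pvNoteA (st.2.headD ' ') != pvNoteA c)
  then (st.1 ++ [st.2], [c])
  else (st.1, st.2 ++ [c])

-- stage-2 loop: for i, run in enumerate(runs): if is_note(run[0]): return joins
def pvStage2 (word : String) (runs : List (List Char)) : Nat → List (List Char) → String × String × String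
  | _, [] => (word, "", "")
  | i, r :: rs =>
    if pvNoteA (r.headD ' ') then
      (String.ofList ((runs.take i).flatten),
       String.ofList r,
       String.ofList ((runs.drop (i + 1)).flatten))
    else pvStage2 word runs (i + 1) rs

def to_notename_alt (word : String) : String × String × String :=
  let st := word.toList.foldl pvStep ([], [])
  let runs := if st.2.isEmpty then st.1 else st.1 ++ [st.2]   -- if cur: runs.append(cur)
  pvStage2 word runs 0 runs

-- ===== PRECONDITION & SPEC =====
def Spec_to_notename (word : String) (out : String × String × String) : Prop := out = to_notename_alt word
instance (word : String) (out : String × String × String) : Decidable (Spec_to_notename word out) := by unfold Spec_to_notename; infer_instance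

-- ===== CLAIM (what is proved, stated in full; the proofs are below) =====
def Claim_equal_to_notename : Prop := ∀ (word : String), Dom_to_notename word → Spec_to_notename word (to_notename word)

-- ===== LEMMAS AND PROOFS =====

-- the common characterisation both ports are proved equal to
def pvF (word : String) : String × String × String :=
  if word.toList.dropWhile (fun c => !pvNoteA c) = [] then (word, "", "")
  else (String.ofList (word.toList.takeWhile (fun c => !pvNoteA c)),
        String.ofList ((word.toList.dropWhile (fun c => !pvNoteA c)).takeWhile pvNoteA),
        String.ofList ((word.toList.dropWhile (fun c => !pvNoteA c)).dropWhile pvNoteA))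

theorem take_len_takeWhile {α : Type} (p : α → Bool) (l : List α) :
    l.take (l.takeWhile p).length = l.takeWhile p := by
  induction l with
  | nil => rfl
  | cons x t ih =>
    by_cases h : p x <;> simp [h, List.take_succ_cons, ih]

theorem drop_len_takeWhile {α : Type} (p : α → Bool) (l : List α) :
    l.drop (l.takeWhile p).length = l.dropWhile p := by
  induction l with
  | nil => rfl
  | cons x t ih =>
    by_cases h : p x <;> simp [h, ih]

theorem dropWhile_head_false {α : Type} (p : α → Bool) (cs : List α) (x : α) (rest' : List α)
    (h : cs.dropWhile p = x :: rest') : p x = false := by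
  induction cs with
  | nil => simp [List.dropWhile] at h
  | cons c t ih =>
    by_cases hc : p c
    · simp [List.dropWhile, hc] at h; exact ih h
    · simp [List.dropWhile, hc] at h
      rw [← h.1]
      exact Bool.eq_false_iff.mpr hc

-- A's loop after the flag has been set: it runs off the end or breaks at the run's end
theorem pvLoopA_true (cs : List Char) (i : Nat) (s : Int) :
    pvLoopA cs i s (-1) true =
      if cs.dropWhile pvNoteA = [] then (s, -1, true)
      else (s, ((i + (cs.takeWhile pvNoteA).length : Nat) : Int), true) := by
  induction cs generalizing i with
  | nil => simp [pvLoopA]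
  | cons c rest ih =>
    by_cases hn : pvNoteA c
    · simp only [pvLoopA, hn, if_true, Bool.not_true, Bool.false_eq_true, if_false,
        List.dropWhile_cons, List.takeWhile_cons, ih (i + 1)]
      split
      · rfl
      · have : i + 1 + (rest.takeWhile pvNoteA).length =
            i + (c :: rest.takeWhile pvNoteA).length := by
          simp [List.length_cons]; omega
        rw [this]
    · simp [pvLoopA, hn]

-- A's loop before any note letter has been seen
theorem pvLoopA_false (cs : List Char) (i : Nat) (s e : Int) :
    pvLoopA cs i s e false =
      if cs.dropWhile (fun c => !pvNoteA c) = [] then (s, e, false)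
      else pvLoopA (cs.dropWhile (fun c => !pvNoteA c)).tail
             (i + (cs.takeWhile (fun c => !pvNoteA c)).length + 1)
             ((i + (cs.takeWhile (fun c => !pvNoteA c)).length : Nat) : Int) e true := by
  induction cs generalizing i with
  | nil => simp [pvLoopA]
  | cons c rest ih =>
    by_cases hn : pvNoteA c
    · simp [pvLoopA, hn]
    · simp only [pvLoopA, hn, Bool.false_eq_true, if_false, Bool.not_false, if_true,
        List.dropWhile_cons, List.takeWhile_cons, ih (i + 1)]
      split
      · rfl
      · have : i + 1 + (rest.takeWhile (fun c => !pvNoteA c)).length =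
            i + (c :: rest.takeWhile (fun c => !pvNoteA c)).length := by
          simp [List.length_cons]; omega
        rw [this]

-- A equals the characterisation
theorem to_notename_eq_pvF (word : String) : to_notename word = pvF word := by
  unfold to_notename pvF
  set cs := word.toList with hcs
  set pre := cs.takeWhile (fun c => !pvNoteA c) with hpre
  set rest := cs.dropWhile (fun c => !pvNoteA c) with hrest
  have hsplit : pre ++ rest = cs := List.takeWhile_append_dropWhile
  rw [pvLoopA_false cs 0 (-1) (-1), ← hrest, ← hpre]
  by_cases hempty : rest = []
  · rw [if_pos hempty, if_pos hempty]
    simp [pvFinishA, pvRetA]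
  · obtain ⟨r, rest', hr⟩ := List.exists_cons_of_ne_nil hempty
    have hrnote : pvNoteA r = true := by
      have := dropWhile_head_false (fun c => !pvNoteA c) cs r rest' (hrest ▸ hr)
      simpa using this
    set k := pre.length with hk
    set m := (rest'.takeWhile pvNoteA).length with hm
    rw [if_neg hempty, if_neg hempty, hr, List.tail_cons, Nat.zero_add]
    rw [pvLoopA_true rest' (k + 1) (k : Int)]
    have hBtake : cs.take k = pre := by rw [← hsplit, hk]; simp
    have hdropk : cs.drop k = rest := by rw [← hsplit, hk]; simp
    have htakerest : rest.takeWhile pvNoteA = r :: rest'.takeWhile pvNoteA := by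
      rw [hr, List.takeWhile_cons, if_pos hrnote]
    have hdroprest : rest.dropWhile pvNoteA = rest'.dropWhile pvNoteA := by
      rw [hr, List.dropWhile_cons, if_pos hrnote]
    by_cases hrun : rest'.dropWhile pvNoteA = []
    · -- the note run reaches the end of the word: A's end_idx is fixed up to len(word)
      have h2 : rest'.takeWhile pvNoteA = rest' := by
        conv_rhs => rw [← List.takeWhile_append_dropWhile (p := pvNoteA) (l := rest')]
        rw [hrun, List.append_nil]
      have hlenfix : cs.length = k + 1 + m := by
        have h1 : cs.length = k + rest.length := by rw [← hsplit]; simp [hk]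
        have : rest'.length = m := by rw [hm, h2]
        rw [h1, hr, List.length_cons]; omega
      rw [if_pos hrun]
      simp only [pvFinishA, pvRetA]
      rw [if_pos (by simp), if_neg (by simp)]
      refine Prod.ext ?_ (Prod.ext ?_ ?_) <;>
        apply String.toList_inj.mp <;>
        simp only [PySem.Str.toList_slice, PySem.Chars.slice_eq_listSlice, ← hcs,
          String.toList_ofList]
      · rw [PySem.List.slice_to_natCast, hBtake]
      · rw [PySem.List.slice_natCast cs k cs.length, hlenfix, hdropk, hr,
          List.takeWhile_cons, if_pos hrnote, h2]
        have hmlen : m = rest'.length := by rw [hm, h2]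
        have hidx : k + 1 + m - k = m + 1 := by omega
        rw [hidx, List.take_succ_cons, hmlen, List.take_length]
      · rw [PySem.List.slice_from_natCast, List.dropWhile_cons, if_pos hrnote, hrun]
        exact List.drop_eq_nil_of_le (by omega)
    · -- the loop breaks inside the word at index k + 1 + m
      rw [if_neg hrun, ← hm]
      simp only [pvFinishA, pvRetA, Bool.true_and]
      rw [if_neg (by simp; omega), if_neg (by simp; omega)]
      refine Prod.ext ?_ (Prod.ext ?_ ?_) <;>
        apply String.toList_inj.mp <;>
        simp only [PySem.Str.toList_slice, PySem.Chars.slice_eq_listSlice, ← hcs,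
          String.toList_ofList]
      · rw [PySem.List.slice_to_natCast, hBtake]
      · rw [PySem.List.slice_natCast cs k (k + 1 + m), hdropk,
          List.takeWhile_cons, if_pos hrnote]
        have hidx : k + 1 + m - k = m + 1 := by omega
        rw [hidx, hr, List.take_succ_cons, hm, take_len_takeWhile]
      · rw [PySem.List.slice_from_natCast]
        have h1 : cs.drop (k + 1 + m) = rest.drop (1 + m) := by
          rw [← hdropk, List.drop_drop]; ring_nf
        have h2 : (1 + m : Nat) = (rest.takeWhile pvNoteA).length := by
          rw [htakerest]; simp [hm]; omega
        rw [h1, h2, drop_len_takeWhile, hdroprest, List.dropWhile_cons, if_pos hrnote]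

-- ===== B side =====

-- the run decomposition B's stage 1 computes, in closed form
def pvRunsOf : List Char → List (List Char)
  | [] => []
  | c :: rest =>
    (c :: rest.takeWhile (fun x => pvNoteA x == pvNoteA c)) ::
      pvRunsOf (rest.dropWhile (fun x => pvNoteA x == pvNoteA c))
termination_by cs => cs.length
decreasing_by
  simp only [List.length_cons]
  exact Nat.lt_succ_of_le (List.length_dropWhile_le _ _)

theorem pvRunsOf_cons (c : Char) (rest : List Char) :
    pvRunsOf (c :: rest) =
      (c :: rest.takeWhile (fun x => pvNoteA x == pvNoteA c)) ::
        pvRunsOf (rest.dropWhile (fun x => pvNoteA x == pvNoteA c)) := by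
  rw [pvRunsOf.eq_def]

def pvFlush (st : List (List Char) × List Char) : List (List Char) :=
  if st.2.isEmpty then st.1 else st.1 ++ [st.2]

theorem pvFold_runs (cs : List Char) : ∀ (runs : List (List Char)) (cur : List Char) (b : Bool),
    cur ≠ [] → (∀ c ∈ cur, pvNoteA c = b) →
    pvFlush (cs.foldl pvStep (runs, cur)) =
      runs ++ (cur ++ cs.takeWhile (fun x => pvNoteA x == b)) ::
        pvRunsOf (cs.dropWhile (fun x => pvNoteA x == b)) := by
  induction cs with
  | nil =>
    intro runs cur b hne _
    simp [pvFlush, List.isEmpty_iff, hne, pvRunsOf]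
  | cons c rest ih =>
    intro runs cur b hne hhom
    obtain ⟨h0, t0, hcur⟩ := List.exists_cons_of_ne_nil hne
    have hhead : pvNoteA (cur.head?.getD ' ') = b := by
      subst hcur; simpa using hhom h0 (by simp)
    by_cases hc : pvNoteA c = b
    · have hstep : pvStep (runs, cur) c = (runs, cur ++ [c]) := by
        simp [pvStep, hhead, hc]
      have hhom' : ∀ x ∈ cur ++ [c], pvNoteA x = b := by
        intro x hx
        rcases List.mem_append.mp hx with h | h
        · exact hhom x h
        · simp at h; subst h; exact hc
      rw [List.foldl_cons, hstep, ih runs (cur ++ [c]) b (by simp) hhom']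
      simp [hc]
    · have hstep : pvStep (runs, cur) c = (runs ++ [cur], [c]) := by
        simp [pvStep, hne, hhead]
        exact fun h => hc h.symm
      rw [List.foldl_cons, hstep,
        ih (runs ++ [cur]) [c] (pvNoteA c) (by simp) (by simp)]
      simp only [List.takeWhile_cons, List.dropWhile_cons]
      have hb : (pvNoteA c == b) = false := by simp [hc]
      rw [hb]
      simp [pvRunsOf_cons]

theorem pvStage1_eq (cs : List Char) :
    pvFlush (cs.foldl pvStep ([], [])) = pvRunsOf cs := by
  cases cs with
  | nil => simp [pvFlush, pvRunsOf]
  | cons c rest =>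
    have hstep : pvStep ([], []) c = ([], [c]) := by simp [pvStep]
    rw [List.foldl_cons, hstep, pvFold_runs rest [] [c] (pvNoteA c) (by simp) (by simp),
      pvRunsOf_cons]
    simp

theorem pvRunsOf_flatten (cs : List Char) : (pvRunsOf cs).flatten = cs := by
  induction cs using pvRunsOf.induct with
  | case1 => simp [pvRunsOf]
  | case2 c rest ih =>
    rw [pvRunsOf_cons]
    simp only [List.flatten_cons, ih]
    simp [List.takeWhile_append_dropWhile]

-- B equals the characterisation
theorem pvB_eq_pvF (word : String) : to_notename_alt word = pvF word := by
  show pvStage2 word (pvFlush (word.toList.foldl pvStep ([], []))) 0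
      (pvFlush (word.toList.foldl pvStep ([], []))) = pvF word
  rw [pvStage1_eq]
  unfold pvF
  cases hcs : word.toList with
  | nil => simp [pvRunsOf, pvStage2]
  | cons c rest =>
    rw [pvRunsOf_cons]
    by_cases hn : pvNoteA c
    · have hpred : (fun x => pvNoteA x == pvNoteA c) = pvNoteA := by
        funext x; simp [hn]
      rw [hpred]
      simp [pvStage2, hn, pvRunsOf_flatten]
    · have hb : pvNoteA c = false := by simpa using hn
      have hpred : (fun x => pvNoteA x == pvNoteA c) = (fun x => !pvNoteA x) := by
        funext x; simp [hb]
      rw [hpred]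
      cases hrest : rest.dropWhile (fun x => !pvNoteA x) with
      | nil =>
        simp [pvStage2, pvRunsOf, hb, hrest]
      | cons d ds =>
        have hd : pvNoteA d = true := by
          have := dropWhile_head_false (fun x => !pvNoteA x) rest d ds hrest
          simpa using this
        rw [pvRunsOf_cons]
        have hpredd : (fun x => pvNoteA x == pvNoteA d) = pvNoteA := by
          funext x; simp [hd]
        rw [hpredd]
        simp [pvStage2, hb, hd, hrest, pvRunsOf_flatten]

-- ===== VERDICT (by name: the statement is the Claim_ definition above) =====
theorem to_notename_spec : Claim_equal_to_notename := by
  intro word _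
  unfold Spec_to_notename
  rw [to_notename_eq_pvF, pvB_eq_pvF]
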